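-- pv_equiv track=rewrite | github.com/BUCKFAE/Semester06 | TheoInf/Exercises/Sheet04/main.py | DyadicRepresentation
-- ===== SOURCE A (Python) =====
-- def DyadicRepresentation(x):
--     # base10 to dyadic
--     #return [] if x < 1 else [2 if (x // (2 * (i))) % 2 == 0 else 1 for i in range(0, int(x ** (1 / 2)) + 1)]
--     res = []
--
--     if x < 1:
--         return res
--
--
--     curr = x
--     while curr > 0:
--
--         if (curr) % 2 == 0:
--             curr = (curr // 2) - 1
--             res += [2]
--         else:
--             res += [1]
--             curr = (curr // 2)
--
--     return res[::-1]
-- ===== SOURCE B (Python) =====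
-- def DyadicRepresentation(x):
--     # closed form: digit count L from bit_length, then read the rank's binary
--     # expansion MSB-first, mapping bit b to dyadic digit b+1
--     if x < 1:
--         return []
--     L = (x + 1).bit_length() - 1
--     index = x + 1 - 2 ** L
--     return [(index // 2 ** (L - 1 - k)) % 2 + 1 for k in range(L)]
-- ===== Notes on version B (the rewrite author's own statement) =====
-- stated objective: alternative
-- what changed: Replaces A's peel-digits-LSB-first-then-reverse loop by a closed form: compute the digit count L from (x+1).bit_length(), the rank index = x+1-2**L, and emit the L digits MSB-first directly by reading index's binary expansion (bit b -> digit b+1).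
import Mathlib
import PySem

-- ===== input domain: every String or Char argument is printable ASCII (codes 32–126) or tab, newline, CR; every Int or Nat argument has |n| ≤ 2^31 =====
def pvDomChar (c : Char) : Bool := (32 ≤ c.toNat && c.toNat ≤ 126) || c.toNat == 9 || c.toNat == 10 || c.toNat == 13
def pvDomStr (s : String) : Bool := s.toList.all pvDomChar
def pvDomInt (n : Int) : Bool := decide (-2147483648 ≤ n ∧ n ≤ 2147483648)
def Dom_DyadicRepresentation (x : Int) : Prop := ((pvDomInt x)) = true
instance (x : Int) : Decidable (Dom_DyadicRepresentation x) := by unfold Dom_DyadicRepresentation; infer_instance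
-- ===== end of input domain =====

-- B replaces A's peel-digits-then-reverse loop by a closed form from bit_length; objective: alternative algorithm.

-- ===== PORT A =====
-- the while loop: state (curr, res), appending one digit per iteration
def pvLoopA (curr : Int) (res : List Int) : List Int :=
  if 0 < curr then
    if PySem.Int.mod curr 2 = 0 then
      pvLoopA (PySem.Int.floordiv curr 2 - 1) (res ++ [2])
    else
      pvLoopA (PySem.Int.floordiv curr 2) (res ++ [1])
  else res
termination_by curr.toNat
decreasing_by
  · rw [PySem.Int.floordiv_eq_ediv_of_pos (by omega : (0:Int) < 2)]; omega
  · rw [PySem.Int.floordiv_eq_ediv_of_pos (by omega : (0:Int) < 2)]; omega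

def DyadicRepresentation (x : Int) : List Int :=
  if x < 1 then []
  else (PySem.List.slice? (pvLoopA x []) none none (-1)).getD []  -- res[::-1]

-- ===== PORT B =====
def DyadicRepresentation_alt (x : Int) : List Int :=
  if x < 1 then []
  else
    let L : Int := (PySem.Int.bitLength (x + 1) : Int) - 1
    let index : Int := x + 1 - 2 ^ L.toNat          -- 2 ** L; L ≥ 0 here, so .toNat is exact
    (PySem.List.pyRange 0 L 1).map (fun k =>
      PySem.Int.mod (PySem.Int.floordiv index (2 ^ (L - 1 - k).toNat)) 2 + 1)
      -- 2 ** (L-1-k); exponent is ≥ 0 for every k in range(L), so .toNat is exact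

-- ===== PRECONDITION & SPEC =====
def Spec_DyadicRepresentation (x : Int) (out : List Int) : Prop := out = DyadicRepresentation_alt x
instance (x : Int) (out : List Int) : Decidable (Spec_DyadicRepresentation x out) := by unfold Spec_DyadicRepresentation; infer_instance

-- ===== CLAIM (what is proved, stated in full; the proofs are below) =====
def Claim_equal_DyadicRepresentation : Prop := ∀ (x : Int), Dom_DyadicRepresentation x → Spec_DyadicRepresentation x (DyadicRepresentation x)

-- ===== LEMMAS AND PROOFS =====

-- reference: MSB-first dyadic digits of x, indexed by n = x + 1
def refDigits (n : Nat) : List Int :=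
  if 2 ≤ n then refDigits (n / 2) ++ [((n % 2 : Nat) : Int) + 1] else []
termination_by n
decreasing_by omega

lemma refDigits_ge_two {n : Nat} (h : 2 ≤ n) :
    refDigits n = refDigits (n / 2) ++ [((n % 2 : Nat) : Int) + 1] := by
  rw [refDigits]; simp [h]

lemma refDigits_lt_two {n : Nat} (h : n < 2) : refDigits n = [] := by
  rw [refDigits]; simp [(show ¬ 2 ≤ n by omega)]

lemma pvLoopA_eq (curr : Int) (hc : 0 ≤ curr) (res : List Int) :
    pvLoopA curr res = res ++ (refDigits (curr + 1).toNat).reverse := by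
  have H : ∀ N : Nat, ∀ c : Int, c.toNat ≤ N → 0 ≤ c → ∀ r : List Int,
      pvLoopA c r = r ++ (refDigits (c + 1).toNat).reverse := by
    intro N
    induction N with
    | zero =>
      intro c h hcn r
      rw [pvLoopA, if_neg (show ¬ 0 < c by omega), refDigits_lt_two (by omega)]
      simp
    | succ N ih =>
      intro c h hcn r
      rw [pvLoopA]
      by_cases hp : 0 < c
      · rw [if_pos hp]
        simp only [PySem.Int.mod_eq_emod_of_pos (show (0:Int) < 2 by omega),
          PySem.Int.floordiv_eq_ediv_of_pos (show (0:Int) < 2 by omega)]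
        by_cases he : c % 2 = 0
        · rw [if_pos he, ih (c / 2 - 1) (by omega) (by omega)]
          rw [refDigits_ge_two (show 2 ≤ (c + 1).toNat by omega),
            show (c / 2 - 1 + 1).toNat = (c + 1).toNat / 2 by omega,
            show (c + 1).toNat % 2 = 1 by omega]
          simp
        · rw [if_neg he, ih (c / 2) (by omega) (by omega)]
          rw [refDigits_ge_two (show 2 ≤ (c + 1).toNat by omega),
            show (c / 2 + 1).toNat = (c + 1).toNat / 2 by omega,
            show (c + 1).toNat % 2 = 0 by omega]
          simp
      · rw [if_neg hp, refDigits_lt_two (by omega)]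
        simp
  exact H curr.toNat curr le_rfl hc res

lemma ref_closed (n : Nat) (h : 1 ≤ n) :
    refDigits n =
      (List.range (PySem.Int.bitLength (n : Int) - 1)).map
        (fun k => ((((n - 2 ^ (PySem.Int.bitLength (n : Int) - 1)) /
            2 ^ (PySem.Int.bitLength (n : Int) - 1 - 1 - k)) % 2 : Nat) : Int) + 1) := by
  induction n using Nat.strong_induction_on with
  | _ n ih =>
    by_cases h2 : 2 ≤ n
    · -- recursive case
      have hm1 : 1 ≤ n / 2 := by omega
      have hbl : PySem.Int.bitLength (n : Int) =
          PySem.Int.bitLength ((n / 2 : Nat) : Int) + 1 :=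
        PySem.Int.bitLength_natCast (m := n) (by omega)
      have hlN1 : 1 ≤ PySem.Int.bitLength ((n / 2 : Nat) : Int) := by
        rw [PySem.Int.bitLength_natCast (m := n / 2) (by omega)]; omega
      set l' : Nat := PySem.Int.bitLength ((n / 2 : Nat) : Int) - 1 with hl'
      have hpow : 2 ^ l' ≤ n / 2 := by
        have := PySem.Int.two_pow_bitLength_le ((n / 2 : Nat) : Int)
          (by exact_mod_cast (show ((n / 2 : Nat) : Int) ≠ 0 by exact_mod_cast (by omega : n / 2 ≠ 0)))
        simpa using this
      have hp2 : 2 ^ (l' + 1) = 2 * 2 ^ l' := by ring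
      have hL : PySem.Int.bitLength (n : Int) - 1 = l' + 1 := by rw [hbl]; omega
      have hidx : n - 2 ^ (l' + 1) = 2 * (n / 2 - 2 ^ l') + n % 2 := by omega
      rw [refDigits_ge_two h2, hL, List.range_succ, List.map_append, List.map_singleton]
      have hlast : ((n - 2 ^ (l' + 1)) / 2 ^ (l' + 1 - 1 - l')) % 2 = n % 2 := by
        rw [show l' + 1 - 1 - l' = 0 by omega]
        simp only [pow_zero, Nat.div_one]
        omega
      rw [hlast]
      have hfirst : refDigits (n / 2) =
          (List.range l').map (fun k =>
            ((((n - 2 ^ (l' + 1)) / 2 ^ (l' + 1 - 1 - k)) % 2 : Nat) : Int) + 1) := by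
        rw [ih (n / 2) (by omega) hm1]
        refine List.map_congr_left ?_
        intro k hk
        rw [List.mem_range] at hk
        have hdiv : (n - 2 ^ (l' + 1)) / 2 ^ (l' + 1 - 1 - k) =
            (n / 2 - 2 ^ l') / 2 ^ (l' - 1 - k) := by
          have e1 : 2 ^ (l' + 1 - 1 - k) = 2 * 2 ^ (l' - 1 - k) := by
            rw [show l' + 1 - 1 - k = (l' - 1 - k) + 1 by omega, pow_succ]; ring
          rw [e1, ← Nat.div_div_eq_div_mul,
            show (n - 2 ^ (l' + 1)) / 2 = n / 2 - 2 ^ l' by omega]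
        rw [← hl', hdiv]
      rw [hfirst]
    · -- n = 1
      have hn : n = 1 := by omega
      subst hn
      rw [show PySem.Int.bitLength ((1 : Nat) : Int) = 1 by decide]
      simp [refDigits_lt_two]

lemma pv_mod_floordiv_natCast (a b : Nat) :
    PySem.Int.mod (PySem.Int.floordiv ((a : Nat) : Int) ((b : Nat) : Int)) 2 =
      ((a / b % 2 : Nat) : Int) := by
  rw [PySem.Int.floordiv_natCast, show (2 : Int) = ((2 : Nat) : Int) by norm_num,
    PySem.Int.mod_natCast]

lemma alt_eq (x : Int) (hx : 1 ≤ x) :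
    DyadicRepresentation_alt x = refDigits (x + 1).toNat := by
  have hxn : (((x + 1).toNat : Nat) : Int) = x + 1 := by omega
  simp only [DyadicRepresentation_alt, if_neg (show ¬ x < 1 by omega)]
  rw [← hxn]
  set n : Nat := (x + 1).toNat with hn
  have hn2 : 2 ≤ n := by omega
  have hlN1 : 1 ≤ PySem.Int.bitLength ((n : Nat) : Int) := by
    rw [PySem.Int.bitLength_natCast (m := n) (by omega)]; omega
  have hpl : 2 ^ (PySem.Int.bitLength ((n : Nat) : Int) - 1) ≤ n := by
    have := PySem.Int.two_pow_bitLength_le ((n : Nat) : Int)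
      (by exact_mod_cast (by omega : n ≠ 0))
    simpa using this
  rw [Int.toNat_natCast, ref_closed n (by omega)]
  set lN : Nat := PySem.Int.bitLength ((n : Nat) : Int) with hlN
  set l : Nat := lN - 1 with hl
  rw [PySem.List.pyRange_one, List.map_map,
    show (((lN : Int) - 1) - 0).toNat = l by omega]
  refine List.map_congr_left ?_
  intro k hk
  rw [List.mem_range] at hk
  simp only [Function.comp_apply]
  have e0 : ((lN : Int) - 1).toNat = l := by omega
  have e2 : (((lN : Int) - 1) - 1 - (0 + (k : Int))).toNat = l - 1 - k := by omega
  have ecast : ((2 : Int) ^ (l - 1 - k)) = ((2 ^ (l - 1 - k) : Nat) : Int) := by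
    push_cast; ring
  have eidx : ((n : Int) - 2 ^ l) = ((n - 2 ^ l : Nat) : Int) := by
    have h2l : ((2 : Int) ^ l) = ((2 ^ l : Nat) : Int) := by push_cast; ring
    omega
  rw [e0, e2, eidx, ecast, pv_mod_floordiv_natCast]

-- ===== VERDICT (by name: the statement is the Claim_ definition above) =====
theorem DyadicRepresentation_spec : Claim_equal_DyadicRepresentation := by
  intro x _
  unfold Spec_DyadicRepresentation DyadicRepresentation
  by_cases hx : x < 1
  · simp [DyadicRepresentation_alt, hx]
  · simp only [if_neg hx]
    rw [PySem.List.slice?_none_none_neg_one]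
    rw [pvLoopA_eq x (by omega) [], alt_eq x (by omega)]
    simp
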